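-- pv_equiv track=rewrite | github.com/ramotomer/dirchanger | item_filtering.py | file_condition__fuzzy_contains
-- ===== SOURCE A (Python) =====
-- def file_condition__fuzzy_contains(filename: str, specifier: str) -> bool:
--     """
--     Find if the filename could be turned into the specifier by removing characters.
--     Case-insensitive.
--
--     Examples:
--         ("hello", 'h') -> True
--         ("hEllo", 'ell') -> True
--         ("hello", 'ho') -> True
--         ("hello", 'bel') -> False
--         ("hello world", 'hw') -> True
--         ("hello world", 'helwo') -> True
--         ("hello world", 'allo') -> False
--         ("", 'a') -> False
--         ("a", '') -> True
--     """
--     remaining_filename = filename.lower()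
--     remaining_specifier = specifier.lower()
--
--     while remaining_specifier:
--         current_char = remaining_specifier[0]
--         if current_char not in remaining_filename:
--             return False
--
--         remaining_filename = remaining_filename[remaining_specifier.index(remaining_specifier[0]) + 1:]
--         remaining_specifier = remaining_specifier[1:]
--
--     return True
-- ===== SOURCE B (Python) =====
-- def file_condition__fuzzy_contains(filename: str, specifier: str) -> bool:
--     text = filename.lower()
--     pos = 0
--     for char in specifier.lower():
--         pos = text.find(char, pos)
--         if pos == -1:
--             return False
--         pos += 1
--     return True
-- ===== Notes on version B (the rewrite author's own statement) =====
-- stated objective: faster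
-- what changed: Replaced the per-character membership scans over shrinking filename slices with the standard greedy two-pointer subsequence check (str.find with a moving start index).
-- intended difference: On inputs where every lowered specifier character occurs in the lowered filename at or after its own specifier position but the specifier is NOT a subsequence of the filename (e.g. ('aab','ba')), A returns True and B returns False; B's value is intended because A's docstring and examples specify a remove-characters (subsequence) check, and A's slice index is taken from the specifier instead of the filename. — e.g. on file_condition__fuzzy_contains("aab", "ba"): A returns true, B returns false
import Mathlib
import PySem

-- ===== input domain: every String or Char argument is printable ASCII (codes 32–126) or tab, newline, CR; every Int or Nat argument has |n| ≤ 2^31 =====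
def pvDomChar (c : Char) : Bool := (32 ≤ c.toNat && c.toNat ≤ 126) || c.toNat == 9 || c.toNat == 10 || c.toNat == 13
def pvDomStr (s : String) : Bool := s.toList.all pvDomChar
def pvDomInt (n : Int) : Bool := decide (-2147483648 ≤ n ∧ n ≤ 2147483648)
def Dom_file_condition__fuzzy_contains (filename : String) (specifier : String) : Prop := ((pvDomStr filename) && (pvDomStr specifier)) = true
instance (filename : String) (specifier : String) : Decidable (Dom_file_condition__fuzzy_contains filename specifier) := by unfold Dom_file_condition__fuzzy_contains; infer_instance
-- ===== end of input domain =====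

-- B is the standard greedy two-pointer subsequence check (faster: one pass instead of a
-- scan per specifier character); A's slice index is taken from the wrong string, so on
-- the inputs described by D_ below A wrongly returns true and B returns the intended false.

-- ===== PORT A =====
-- the while loop of A: state = (remaining_filename, remaining_specifier)
def pvFuzzyLoopA : List Char → List Char → Bool
  | _, [] => true
  | rf, c :: rest =>
    if PySem.Chars.isIn [c] rf then
      pvFuzzyLoopA
        (PySem.List.slice rf
          (some ((((PySem.List.index? (c :: rest) c).getD 0 : Nat) : Int) + 1)) none)
        rest
    else false

def file_condition__fuzzy_contains (filename : String) (specifier : String) : Bool :=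
  pvFuzzyLoopA (PySem.Chars.lower filename.toList) (PySem.Chars.lower specifier.toList)

-- ===== PORT B =====
-- B's for loop over specifier.lower(), state = pos; text.find(char, pos) is Chars.findFrom
def pvSubLoopB (text : List Char) : List Char → Nat → Bool
  | [], _ => true
  | c :: rest, pos =>
    let j := PySem.Chars.findFrom text [c] (pos : Int) none
    if j = -1 then false else pvSubLoopB text rest (j.toNat + 1)

def file_condition__fuzzy_contains_alt (filename : String) (specifier : String) : Bool :=
  pvSubLoopB (PySem.Chars.lower filename.toList) (PySem.Chars.lower specifier.toList) 0

-- ===== PRECONDITION & SPEC =====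
-- On inputs where every lowered specifier character occurs in the lowered filename at or
-- after its own specifier position but the specifier is not a subsequence of the filename,
-- A returns true and B returns false; B's value is the intended one (A's docstring and
-- examples specify a remove-characters/subsequence check; A slices by an index taken from
-- the specifier instead of the filename).
-- decision helpers for D_ (cheap to evaluate; used only by D_'s Decidable instance below)
def pvLastDict (cs : List Char) : PySem.Dict Char Int :=
  cs.zipIdx.foldl (fun d p => d.insert p.1 (p.2 : Int)) PySem.Dict.empty

def pvPosOkBool (fl sl : List Char) : Bool :=
  let d := pvLastDict fl
  sl.zipIdx.all (fun p => decide (((p.2 : Nat) : Int) ≤ d.getD p.1 (-1)))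

def D_file_condition__fuzzy_contains (filename : String) (specifier : String) : Prop :=
  (∀ k (h : k < (PySem.Chars.lower specifier.toList).length),
      (PySem.Chars.lower specifier.toList)[k] ∈ (PySem.Chars.lower filename.toList).drop k)
  ∧ ¬ (PySem.Chars.lower specifier.toList).Sublist (PySem.Chars.lower filename.toList)

-- lemmas backing D_'s fast Decidable instance (cited by name by pvD_iff / the instance)
theorem pvEmptyGetD (c : Char) : (PySem.Dict.empty : PySem.Dict Char Int).getD c (-1) = -1 := by
  simp [PySem.Dict.getD, PySem.Dict.get?, PySem.Dict.empty]

theorem pvLastFold_getD_ge (cs : List Char) (s : Nat) (d0 : PySem.Dict Char Int)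
    (c : Char) (i : Int) :
    ((cs.zipIdx s).foldl (fun d p => d.insert p.1 (p.2 : Int)) d0).getD c (-1) ≥ i
      ↔ (∃ k, ∃ _ : k < cs.length, cs[k] = c ∧ (s : Int) + k ≥ i) ∨ (c ∉ cs ∧ d0.getD c (-1) ≥ i) := by
  induction cs generalizing s d0 with
  | nil => simp [List.zipIdx]
  | cons a tl ih =>
    rw [List.zipIdx_cons]
    simp only [List.foldl_cons]
    rw [ih, PySem.Dict.getD_insert]
    constructor
    · rintro (⟨k, hk, hkc, hki⟩ | ⟨hnm, hd⟩)
      · exact Or.inl ⟨k + 1, by simpa using hk, by simpa using hkc, by push_cast at hki ⊢; omega⟩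
      · by_cases hca : c = a
        · rw [if_pos hca] at hd
          exact Or.inl ⟨0, by simp, by simp [hca], by push_cast; omega⟩
        · rw [if_neg hca] at hd
          exact Or.inr ⟨by simp [hca, hnm], hd⟩
    · rintro (⟨k, hk, hkc, hki⟩ | ⟨hnm, hd⟩)
      · cases k with
        | zero =>
          simp only [List.getElem_cons_zero] at hkc
          by_cases htl : c ∈ tl
          · obtain ⟨j, hj, hjc⟩ := List.mem_iff_getElem.mp htl
            exact Or.inl ⟨j, hj, hjc, by push_cast at hki ⊢; omega⟩
          · refine Or.inr ⟨htl, ?_⟩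
            rw [if_pos hkc.symm]
            push_cast at hki; omega
        | succ k =>
          exact Or.inl ⟨k, by simpa using hk, by simpa using hkc, by push_cast at hki ⊢; omega⟩
      · have hca : c ≠ a := by intro h; exact hnm (by simp [h])
        have htl : c ∉ tl := fun h => hnm (by simp [h])
        exact Or.inr ⟨htl, by rw [if_neg hca]; exact hd⟩

theorem pvMemDropIff (fl : List Char) (c : Char) (k : Nat) :
    c ∈ fl.drop k ↔ ∃ j, ∃ _ : j < fl.length, fl[j] = c ∧ (k : Int) ≤ (j : Int) := by
  rw [List.mem_iff_getElem]
  constructor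
  · rintro ⟨j, hj, he⟩
    have hj' : k + j < fl.length := by simp [List.length_drop] at hj; omega
    refine ⟨k + j, hj', ?_, by push_cast; omega⟩
    rw [← List.getElem_drop]; exact he
  · rintro ⟨j, hj, he, hk⟩
    have hkj : k ≤ j := by exact_mod_cast hk
    refine ⟨j - k, by simp [List.length_drop]; omega, ?_⟩
    rw [List.getElem_drop]
    have h2 : k + (j - k) = j := by omega
    simp_rw [h2]; exact he

theorem pvPosOk_iff (fl sl : List Char) :
    pvPosOkBool fl sl = true ↔ ∀ k (h : k < sl.length), sl[k] ∈ fl.drop k := by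
  simp only [pvPosOkBool, pvLastDict, List.all_eq_true]
  constructor
  · intro h k hk
    have hmem : (sl[k], k) ∈ sl.zipIdx :=
      List.mem_iff_getElem.mpr ⟨k, by simpa using hk, by simp [List.getElem_zipIdx]⟩
    have hp := h (sl[k], k) hmem
    simp only [decide_eq_true_eq] at hp
    rcases (pvLastFold_getD_ge fl 0 PySem.Dict.empty sl[k] (k : Int)).mp (by omega) with
      ⟨j, hj, hjc, hji⟩ | ⟨_, hd⟩
    · exact (pvMemDropIff fl sl[k] k).mpr ⟨j, hj, hjc, by omega⟩
    · rw [pvEmptyGetD] at hd; omega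
  · intro h p hp
    obtain ⟨k, hk, he⟩ := List.mem_iff_getElem.mp hp
    have hk' : k < sl.length := by simpa using hk
    rw [← he]
    simp only [List.getElem_zipIdx, decide_eq_true_eq]
    obtain ⟨j, hj, hjc, hjk⟩ := (pvMemDropIff fl sl[k] k).mp (h k hk')
    have := (pvLastFold_getD_ge fl 0 PySem.Dict.empty sl[k] (k : Int)).mpr
      (Or.inl ⟨j, hj, hjc, by omega⟩)
    simpa using this

theorem pvD_iff (filename : String) (specifier : String) :
    (pvPosOkBool (PySem.Chars.lower filename.toList) (PySem.Chars.lower specifier.toList)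
        && !((PySem.Chars.lower specifier.toList).isSublist (PySem.Chars.lower filename.toList))) = true
      ↔ D_file_condition__fuzzy_contains filename specifier := by
  unfold D_file_condition__fuzzy_contains
  rw [Bool.and_eq_true, Bool.not_eq_true', ← Bool.not_eq_true, List.isSublist_iff_sublist,
    pvPosOk_iff]

instance (filename : String) (specifier : String) : Decidable (D_file_condition__fuzzy_contains filename specifier) :=
  decidable_of_iff _ (pvD_iff filename specifier)


def Spec_file_condition__fuzzy_contains (filename : String) (specifier : String) (out : Bool) : Prop := ¬ D_file_condition__fuzzy_contains filename specifier → out = file_condition__fuzzy_contains_alt filename specifier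
instance (filename : String) (specifier : String) (out : Bool) : Decidable (Spec_file_condition__fuzzy_contains filename specifier out) := by unfold Spec_file_condition__fuzzy_contains; infer_instance

def pvDiffWitness_file_condition__fuzzy_contains : String × String := ("aab", "ba")
def pvDiffWitnessOut_file_condition__fuzzy_contains : Bool × Bool := (true, false)

-- ===== CLAIM (what is proved, stated in full; the proofs are below) =====
def Claim_unchanged_file_condition__fuzzy_contains : Prop := ∀ (filename : String) (specifier : String), Dom_file_condition__fuzzy_contains filename specifier → Spec_file_condition__fuzzy_contains filename specifier (file_condition__fuzzy_contains filename specifier)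
def Claim_changed_file_condition__fuzzy_contains : Prop := Dom_file_condition__fuzzy_contains (pvDiffWitness_file_condition__fuzzy_contains.1) (pvDiffWitness_file_condition__fuzzy_contains.2) ∧ D_file_condition__fuzzy_contains (pvDiffWitness_file_condition__fuzzy_contains.1) (pvDiffWitness_file_condition__fuzzy_contains.2) ∧ file_condition__fuzzy_contains (pvDiffWitness_file_condition__fuzzy_contains.1) (pvDiffWitness_file_condition__fuzzy_contains.2) = pvDiffWitnessOut_file_condition__fuzzy_contains.1 ∧ file_condition__fuzzy_contains_alt (pvDiffWitness_file_condition__fuzzy_contains.1) (pvDiffWitness_file_condition__fuzzy_contains.2) = pvDiffWitnessOut_file_condition__fuzzy_contains.2 ∧ pvDiffWitnessOut_file_condition__fuzzy_contains.1 ≠ pvDiffWitnessOut_file_condition__fuzzy_contains.2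
def Claim_exact_file_condition__fuzzy_contains : Prop := ∀ (filename : String) (specifier : String), Dom_file_condition__fuzzy_contains filename specifier → D_file_condition__fuzzy_contains filename specifier → file_condition__fuzzy_contains filename specifier ≠ file_condition__fuzzy_contains_alt filename specifier

-- ===== LEMMAS AND PROOFS =====

-- A's loop returns true iff every specifier character occurs in the filename at or after its position
theorem pvFuzzyLoopA_iff (sl fl : List Char) :
    pvFuzzyLoopA fl sl = true ↔ ∀ k (h : k < sl.length), sl[k] ∈ fl.drop k := by
  induction sl generalizing fl with
  | nil => simp [pvFuzzyLoopA]
  | cons c rest ih =>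
    rw [pvFuzzyLoopA, PySem.List.index?_cons_self]
    by_cases hc : c ∈ fl
    · rw [if_pos (by rw [PySem.Chars.isIn_iff_infix, List.singleton_infix_iff]; exact hc)]
      have hslice : PySem.List.slice fl (some ((((0:Nat)):Int) + 1)) none = fl.drop 1 := by
        simpa [List.drop_one] using PySem.List.slice_from_one fl
      rw [show ((some 0 : Option Nat).getD 0 : Nat) = 0 from rfl, hslice, ih]
      constructor
      · intro h k hk
        cases k with
        | zero => simpa using hc
        | succ k =>
          have := h k (by simpa using hk)
          simpa [List.drop_drop, Nat.add_comm] using this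
      · intro h k hk
        have := h (k + 1) (by simpa using hk)
        simpa [List.drop_drop, Nat.add_comm] using this
    · rw [if_neg (by rw [PySem.Chars.isIn_iff_infix, List.singleton_infix_iff]; exact hc)]
      constructor
      · intro h; cases h
      · intro h
        exact absurd (by simpa using h 0 (by simp)) hc

-- a cons sublist decomposes at some matching index
theorem pvConsSublist (c : Char) (rest l : List Char) (h : (c :: rest).Sublist l) :
    ∃ k, ∃ _ : k < l.length, l[k] = c ∧ rest.Sublist (l.drop (k + 1)) := by
  induction l with
  | nil => cases h
  | cons a tl ih =>
    rcases h with _ | h | h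
    case cons h =>
      obtain ⟨k, hk, hc, hr⟩ := ih h
      exact ⟨k + 1, by simpa using hk, by simpa using hc, by simpa using hr⟩
    case cons₂ => exact ⟨0, by simp, by simp, by simpa⟩

-- B's loop decides the subsequence relation on the remaining suffix
theorem pvSubLoopB_iff (sl fl : List Char) (i : Nat) (hi : i ≤ fl.length) :
    pvSubLoopB fl sl i = true ↔ sl.Sublist (fl.drop i) := by
  induction sl generalizing i with
  | nil => simp [pvSubLoopB]
  | cons c rest ih =>
    rw [pvSubLoopB]
    by_cases hneg : PySem.Chars.findFrom fl [c] (i : Int) none = -1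
    · rw [if_pos hneg]
      have hnot : ¬ [c] <:+: fl.drop i :=
        (PySem.Chars.findFrom_natCast_eq_neg_one_iff fl [c] i hi).mp hneg
      constructor
      · intro h; cases h
      · intro h
        obtain ⟨k, hk, hc, _⟩ := pvConsSublist c rest (fl.drop i) h
        exact absurd ((List.singleton_infix_iff c _).mpr (hc ▸ List.getElem_mem hk)) hnot
    · rw [if_neg hneg]
      obtain ⟨hge, hpre, hmin⟩ := PySem.Chars.findFrom_natCast_spec fl [c] i hi hneg
      set j := PySem.Chars.findFrom fl [c] (i : Int) none with hj
      have hj0 : (0 : Int) ≤ j := le_trans (by exact_mod_cast Nat.zero_le i) hge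
      have hji : i ≤ j.toNat := by omega
      have hjlt : j.toNat < fl.length := by
        rcases hpre with ⟨t, ht⟩
        by_contra hge'
        have hnil : fl.drop j.toNat = [] := List.drop_eq_nil_of_le (by omega)
        rw [hnil] at ht; cases ht
      have hfc : fl[j.toNat] = c := by
        rcases hpre with ⟨t, ht⟩
        rw [List.drop_eq_getElem_cons hjlt, List.singleton_append] at ht
        exact (List.cons_eq_cons.mp ht).1.symm
      rw [ih (j.toNat + 1) (by omega)]
      constructor
      · intro hr
        have hsplit : fl.drop i = (fl.drop i).take (j.toNat - i) ++ c :: fl.drop (j.toNat + 1) := by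
          conv_lhs => rw [← List.take_append_drop (j.toNat - i) (fl.drop i)]
          congr 1
          rw [List.drop_drop, show i + (j.toNat - i) = j.toNat by omega,
            List.drop_eq_getElem_cons hjlt, hfc]
        rw [hsplit]
        exact List.sublist_append_of_sublist_right (hr.cons₂ c)
      · intro h
        obtain ⟨k, hk, hc, hr⟩ := pvConsSublist c rest (fl.drop i) h
        have hklen : i + k < fl.length := by
          rw [List.length_drop] at hk; omega
        have hik : fl[i + k] = c := by rw [← List.getElem_drop]; exact hc
        have hmink : j.toNat ≤ i + k := by
          by_contra hlt
          exact hmin (i + k) (by omega) (by omega)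
            ⟨fl.drop (i + k + 1), by
              rw [List.drop_eq_getElem_cons hklen, hik, List.singleton_append]⟩
        have h1 : rest.Sublist (fl.drop (i + k + 1)) := by
          rwa [List.drop_drop, show i + (k + 1) = i + k + 1 by omega] at hr
        have h2 : (fl.drop (i + k + 1)).Sublist (fl.drop (j.toNat + 1)) := by
          rw [show i + k + 1 = j.toNat + 1 + (i + k - j.toNat) by omega, ← List.drop_drop]
          exact List.drop_sublist ..
        exact h1.trans h2

-- a subsequence gives A's positional-membership property
theorem pvSublist_imp_pos (sl fl : List Char) (h : sl.Sublist fl) :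
    ∀ k (hk : k < sl.length), sl[k] ∈ fl.drop k := by
  induction h with
  | slnil => intro k hk; simp at hk
  | @cons l1 l2 a h ih =>
    intro k hk
    have h1 := ih k hk
    cases k with
    | zero => simpa using List.mem_cons_of_mem a (by simpa using h1)
    | succ k =>
      simp only [List.drop_succ_cons]
      have hsub : l2.drop (k + 1) ⊆ l2.drop k := by
        intro x hx
        rw [← List.drop_drop] at hx
        exact List.drop_subset 1 _ hx
      exact hsub h1
  | cons₂ a h ih =>
    intro k hk
    cases k with
    | zero => simp
    | succ k => simpa using ih k (by simpa using hk)

-- ===== VERDICT (by name: the statement is the Claim_ definition above) =====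
theorem file_condition__fuzzy_contains_spec : Claim_unchanged_file_condition__fuzzy_contains := by
  intro filename specifier _
  unfold Spec_file_condition__fuzzy_contains
  intro hnD
  unfold D_file_condition__fuzzy_contains at hnD
  unfold file_condition__fuzzy_contains file_condition__fuzzy_contains_alt
  set fl := PySem.Chars.lower filename.toList with hfl
  set sl := PySem.Chars.lower specifier.toList with hsl
  rw [Bool.eq_iff_iff, pvFuzzyLoopA_iff, pvSubLoopB_iff sl fl 0 (Nat.zero_le _)]
  constructor
  · intro hP
    by_contra hS
    exact hnD ⟨hP, by simpa using hS⟩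
  · intro hS
    exact pvSublist_imp_pos sl fl (by simpa using hS)

theorem file_condition__fuzzy_contains_changed : Claim_changed_file_condition__fuzzy_contains := by
  unfold Claim_changed_file_condition__fuzzy_contains; decide

theorem file_condition__fuzzy_contains_tight : Claim_exact_file_condition__fuzzy_contains := by
  intro filename specifier _ hD
  obtain ⟨hP, hS⟩ := hD
  unfold file_condition__fuzzy_contains file_condition__fuzzy_contains_alt
  have hA : pvFuzzyLoopA (PySem.Chars.lower filename.toList) (PySem.Chars.lower specifier.toList) = true :=
    (pvFuzzyLoopA_iff _ _).mpr hP
  have hB : pvSubLoopB (PySem.Chars.lower filename.toList) (PySem.Chars.lower specifier.toList) 0 = false := by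
    rw [← Bool.not_eq_true, pvSubLoopB_iff _ _ 0 (Nat.zero_le _)]
    simpa using hS
  rw [hA, hB]
  exact Bool.noConfusion
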